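-- pv_equiv track=rewrite | github.com/kaiqd/estrutura-de-dados | recursividade/reset_even_digits.py | zeraPares
-- ===== SOURCE A (Python) =====
-- def zeraPares(num):
--     if num == 0:
--         return 0
--     else:
--         digito = num % 10
--         if digito % 2 == 0:
--             digito = 0
--         return zeraPares(num // 10) * 10 + digito
-- ===== SOURCE B (Python) =====
-- def zeraPares(num):
--     result = 0
--     place = 1
--     while num > 0:
--         d = num % 10
--         if d % 2 == 0:
--             d = 0
--         result += d * place
--         place *= 10
--         num //= 10
--     return result
-- ===== Notes on version B (the rewrite author's own statement) =====
-- stated objective: idiomatic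
-- what changed: Replaces the recursion with an iterative while-loop accumulating result and place-value, which also terminates (returning 0) on negative input where A recurses forever.
import Mathlib
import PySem

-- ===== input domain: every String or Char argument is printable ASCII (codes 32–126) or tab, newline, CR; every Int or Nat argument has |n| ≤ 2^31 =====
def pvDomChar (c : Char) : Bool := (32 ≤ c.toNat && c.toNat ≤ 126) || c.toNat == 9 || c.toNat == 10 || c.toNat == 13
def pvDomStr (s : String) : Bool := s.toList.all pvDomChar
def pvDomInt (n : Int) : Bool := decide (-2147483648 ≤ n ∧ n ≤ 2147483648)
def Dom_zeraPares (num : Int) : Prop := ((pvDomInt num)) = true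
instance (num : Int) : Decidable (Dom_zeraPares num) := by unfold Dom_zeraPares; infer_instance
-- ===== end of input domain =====

-- B replaces A's recursion with an iterative loop over digits; return-value equivalence on num ≥ 0
-- (A raises RecursionError on negative num, which Pre_ excludes; B returns 0 there).

-- ===== PORT A =====
-- literal port of A's recursion; the 'num < 0' guard only makes the port total
-- (A diverges there; such inputs are outside Pre_zeraPares)
def zeraPares (num : Int) : Int :=
  if num = 0 then 0
  else if h : num < 0 then 0
  else
    let digito := PySem.Int.mod num 10
    let digito := if PySem.Int.mod digito 2 = 0 then 0 else digito
    zeraPares (PySem.Int.floordiv num 10) * 10 + digito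
termination_by num.toNat
decreasing_by
  rw [PySem.Int.floordiv_eq_ediv_of_pos (by omega)]
  omega

-- ===== PORT B =====
-- the while-loop of Source B, as tail recursion over the loop state (result, place)
def zeraParesLoop (num result place : Int) : Int :=
  if h : num > 0 then
    let d := PySem.Int.mod num 10
    let d := if PySem.Int.mod d 2 = 0 then 0 else d
    zeraParesLoop (PySem.Int.floordiv num 10) (result + d * place) (place * 10)
  else result
termination_by num.toNat
decreasing_by
  rw [PySem.Int.floordiv_eq_ediv_of_pos (by omega)]
  omega

def zeraPares_alt (num : Int) : Int := zeraParesLoop num 0 1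

-- ===== PRECONDITION & SPEC =====
-- Pre_ excludes negative num, on which A's recursion never terminates (RecursionError).
def Pre_zeraPares (num : Int) : Prop := 0 ≤ num
instance (num : Int) : Decidable (Pre_zeraPares num) := by unfold Pre_zeraPares; infer_instance
def pvWitness_zeraPares : Int := 2468

def Spec_zeraPares (num : Int) (out : Int) : Prop := out = zeraPares_alt num
instance (num : Int) (out : Int) : Decidable (Spec_zeraPares num out) := by unfold Spec_zeraPares; infer_instance

-- ===== CLAIM (what is proved, stated in full; the proofs are below) =====
def Claim_equal_zeraPares : Prop := ∀ (num : Int), Dom_zeraPares num → Pre_zeraPares num → Spec_zeraPares num (zeraPares num)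

-- ===== LEMMAS AND PROOFS =====
-- loop invariant: the loop computes result + (A's value) * place
theorem zeraParesLoop_eq (num : Int) (h0 : 0 ≤ num) :
    ∀ result place : Int, zeraParesLoop num result place = result + zeraPares num * place := by
  induction num using zeraPares.induct with
  | case1 => intro r p; rw [zeraParesLoop, zeraPares]; simp
  | case2 n h1 h2 => omega
  | case3 n h1 h2 ih =>
    intro r p
    rw [zeraParesLoop, zeraPares]
    have hpos : 0 < n := by omega
    have : 0 ≤ PySem.Int.floordiv n 10 := by
      rw [PySem.Int.floordiv_eq_ediv_of_pos (by omega)]; omega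
    simp only [hpos, dif_pos, if_neg h1, dif_neg (by omega : ¬ n < 0)]
    rw [ih this]
    ring

-- ===== VERDICT (by name: the statement is the Claim_ definition above) =====
theorem zeraPares_spec : Claim_equal_zeraPares := by
  intro num _ hpre
  unfold Spec_zeraPares zeraPares_alt
  rw [zeraParesLoop_eq num hpre]
  ring
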